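-- pv_equiv track=rewrite | github.com/monkmantragit/Mastiff | migrate_data_to_directus.py | determine_department
-- ===== SOURCE A (Python) =====
-- def determine_department(position: str) -> str:
--     """Determine department based on job position"""
--     position_lower = position.lower()
--
--     if any(term in position_lower for term in ['director', 'head']):
--         return 'Leadership'
--     elif any(term in position_lower for term in ['creative', 'art', 'design', 'graphic', 'motion']):
--         return 'Creative'
--     elif any(term in position_lower for term in ['operations', 'production', 'executive']):
--         return 'Operations'
--     elif any(term in position_lower for term in ['client', 'servicing', 'relations']):
--         return 'Client Relations'
--     elif any(term in position_lower for term in ['finance', 'accounting']):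
--         return 'Finance'
--     elif any(term in position_lower for term in ['human', 'hr']):
--         return 'HR'
--     elif any(term in position_lower for term in ['marketing', 'digital']):
--         return 'Marketing'
--     else:
--         return 'Operations'
-- ===== SOURCE B (Python) =====
-- # Flat keyword -> priority map (alphabetical); take the minimum priority among
-- # all matching keywords, then index into the department table (7 = default).
-- KEYWORD_PRIORITY = {
--     'accounting': 4, 'art': 1, 'client': 3, 'creative': 1, 'design': 1,
--     'digital': 6, 'director': 0, 'executive': 2, 'finance': 4, 'graphic': 1,
--     'head': 0, 'hr': 5, 'human': 5, 'marketing': 6, 'motion': 1,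
--     'operations': 2, 'production': 2, 'relations': 3, 'servicing': 3,
-- }
--
-- DEPARTMENTS = ['Leadership', 'Creative', 'Operations', 'Client Relations',
--                'Finance', 'HR', 'Marketing', 'Operations']
--
-- def determine_department(position: str) -> str:
--     position_lower = position.lower()
--     best = 7
--     for kw, prio in KEYWORD_PRIORITY.items():
--         if prio < best and kw in position_lower:
--             best = prio
--     return DEPARTMENTS[best]
-- ===== Notes on version B (the rewrite author's own statement) =====
-- stated objective: alternative
-- what changed: Replaced the if/elif chain over keyword groups by a flat alphabetical keyword-to-priority dictionary, a single running-minimum pass that computes the lowest priority among ALL matching keywords (no early exit, no grouping), and an indexed department table with 7 as the default slot; correct because A's answer is exactly the lowest-numbered group containing a matching keyword.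
import Mathlib
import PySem

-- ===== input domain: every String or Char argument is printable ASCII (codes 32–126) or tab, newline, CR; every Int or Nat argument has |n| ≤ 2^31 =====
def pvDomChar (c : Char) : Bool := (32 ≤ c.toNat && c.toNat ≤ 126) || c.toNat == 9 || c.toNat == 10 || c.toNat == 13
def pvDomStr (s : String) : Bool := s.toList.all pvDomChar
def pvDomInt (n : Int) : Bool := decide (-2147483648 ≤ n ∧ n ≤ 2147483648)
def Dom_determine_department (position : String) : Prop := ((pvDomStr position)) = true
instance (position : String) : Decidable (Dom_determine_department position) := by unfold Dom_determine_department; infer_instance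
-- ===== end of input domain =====

-- B replaces A's if/elif keyword-group chain by a flat alphabetical keyword→priority map,
-- a running-minimum pass over all keywords, and an indexed department table; objective: alternative.

-- ===== PORT A =====
def determine_department (position : String) : String :=
  let position_lower := PySem.Str.lower position
  if (["director", "head"].any (fun term => PySem.Str.isIn term position_lower)) then
    "Leadership"
  else if (["creative", "art", "design", "graphic", "motion"].any (fun term => PySem.Str.isIn term position_lower)) then
    "Creative"
  else if (["operations", "production", "executive"].any (fun term => PySem.Str.isIn term position_lower)) then
    "Operations"
  else if (["client", "servicing", "relations"].any (fun term => PySem.Str.isIn term position_lower)) then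
    "Client Relations"
  else if (["finance", "accounting"].any (fun term => PySem.Str.isIn term position_lower)) then
    "Finance"
  else if (["human", "hr"].any (fun term => PySem.Str.isIn term position_lower)) then
    "HR"
  else if (["marketing", "digital"].any (fun term => PySem.Str.isIn term position_lower)) then
    "Marketing"
  else
    "Operations"

-- ===== PORT B =====
-- keyword → priority, alphabetical insertion order (the dict of Source B → association list)
def ddKeywordPriority : List (String × Int) :=
  [ ("accounting", 4), ("art", 1), ("client", 3), ("creative", 1), ("design", 1),
    ("digital", 6), ("director", 0), ("executive", 2), ("finance", 4), ("graphic", 1),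
    ("head", 0), ("hr", 5), ("human", 5), ("marketing", 6), ("motion", 1),
    ("operations", 2), ("production", 2), ("relations", 3), ("servicing", 3) ]

def ddDepartments : List String :=
  ["Leadership", "Creative", "Operations", "Client Relations",
   "Finance", "HR", "Marketing", "Operations"]

def determine_department_alt (position : String) : String :=
  let position_lower := PySem.Str.lower position
  let best := ddKeywordPriority.foldl
    (fun best p => if p.2 < best ∧ PySem.Str.isIn p.1 position_lower then p.2 else best) 7
  (PySem.List.pyGet? ddDepartments best).getD ""  -- best ∈ [0,7], so the default is never used

-- ===== PRECONDITION & SPEC =====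
def Spec_determine_department (position : String) (out : String) : Prop := out = determine_department_alt position
instance (position : String) (out : String) : Decidable (Spec_determine_department position out) := by unfold Spec_determine_department; infer_instance

-- ===== CLAIM (what is proved, stated in full; the proofs are below) =====
def Claim_equal_determine_department : Prop := ∀ (position : String), Dom_determine_department position → Spec_determine_department position (determine_department position)

-- ===== LEMMAS AND PROOFS =====

-- B's running-minimum fold equals a plain `min`-fold over the priorities of the matched keywords.
theorem ddfold_min (q : String → Bool) (l : List (String × Int)) (b : Int) :
    l.foldl (fun best p => if p.2 < best ∧ q p.1 then p.2 else best) b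
      = (l.filterMap (fun p => if q p.1 then some p.2 else none)).foldl min b := by
  induction l generalizing b with
  | nil => rfl
  | cons p l ih =>
    by_cases hin : q p.1 = true
    · simp only [List.foldl_cons, List.filterMap_cons, hin, if_pos, and_true, ih]
      congr 1
      rw [min_def]
      split_ifs <;> omega
    · simp [hin, ih]

-- a `min`-fold over a group of keywords all carrying the same priority i collapses to a single test
theorem ddgroup (q : String → Bool) (g : List (String × Int)) (i : Int)
    (h : ∀ p ∈ g, p.2 = i) (b : Int) :
    (g.filterMap (fun p => if q p.1 then some p.2 else none)).foldl min b
      = if g.any (fun p => q p.1) then min b i else b := by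
  induction g generalizing b with
  | nil => rfl
  | cons p g ih =>
    have hp : p.2 = i := h p (List.mem_cons_self ..)
    have h' : ∀ r ∈ g, r.2 = i := fun r hr => h r (List.mem_cons_of_mem _ hr)
    by_cases hin : q p.1 = true
    · simp only [List.filterMap_cons, hin, if_pos, List.foldl_cons, ih h', List.any_cons,
        Bool.true_or, hp]
      split_ifs with hany
      · simp
      · rfl
    · rw [Bool.not_eq_true] at hin
      simp [hin, ih h']
      simp only [hin, Bool.false_or]

-- A's grouped keyword order (a permutation of B's alphabetical table)
def ddGrouped : List (String × Int) :=
  [ ("director", 0), ("head", 0),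
    ("creative", 1), ("art", 1), ("design", 1), ("graphic", 1), ("motion", 1),
    ("operations", 2), ("production", 2), ("executive", 2),
    ("client", 3), ("servicing", 3), ("relations", 3),
    ("finance", 4), ("accounting", 4),
    ("human", 5), ("hr", 5),
    ("marketing", 6), ("digital", 6) ]

-- ===== VERDICT (by name: the statement is the Claim_ definition above) =====
theorem determine_department_spec : Claim_equal_determine_department := by
  intro position _
  unfold Spec_determine_department
  simp only [determine_department, determine_department_alt]
  generalize PySem.Str.lower position = pl
  rw [ddfold_min (fun s => PySem.Str.isIn s pl)]
  have hperm : ddKeywordPriority.Perm ddGrouped := by decide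
  rw [((hperm.filterMap _).foldl_eq' (fun x _ y _ z => by
        rw [min_assoc, min_assoc, min_comm x y])) 7]
  have hsplit : ddGrouped
      = [("director", (0:Int)), ("head", 0)] ++
        [("creative", 1), ("art", 1), ("design", 1), ("graphic", 1), ("motion", 1)] ++
        [("operations", 2), ("production", 2), ("executive", 2)] ++
        [("client", 3), ("servicing", 3), ("relations", 3)] ++
        [("finance", 4), ("accounting", 4)] ++
        [("human", 5), ("hr", 5)] ++
        [("marketing", 6), ("digital", 6)] := rfl
  rw [hsplit]
  simp only [List.filterMap_append, List.foldl_append]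
  rw [ddgroup (fun s => PySem.Str.isIn s pl) [("director", (0:Int)), ("head", 0)] 0 (by decide),
      ddgroup (fun s => PySem.Str.isIn s pl)
        [("creative", 1), ("art", 1), ("design", 1), ("graphic", 1), ("motion", 1)] 1 (by decide),
      ddgroup (fun s => PySem.Str.isIn s pl)
        [("operations", 2), ("production", 2), ("executive", 2)] 2 (by decide),
      ddgroup (fun s => PySem.Str.isIn s pl)
        [("client", 3), ("servicing", 3), ("relations", 3)] 3 (by decide),
      ddgroup (fun s => PySem.Str.isIn s pl) [("finance", 4), ("accounting", 4)] 4 (by decide),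
      ddgroup (fun s => PySem.Str.isIn s pl) [("human", 5), ("hr", 5)] 5 (by decide),
      ddgroup (fun s => PySem.Str.isIn s pl) [("marketing", 6), ("digital", 6)] 6 (by decide)]
  simp only [List.any_cons, List.any_nil, Bool.or_false]
  generalize (PySem.Str.isIn "director" pl || PySem.Str.isIn "head" pl) = c1
  generalize (PySem.Str.isIn "creative" pl || (PySem.Str.isIn "art" pl ||
      (PySem.Str.isIn "design" pl || (PySem.Str.isIn "graphic" pl ||
      PySem.Str.isIn "motion" pl)))) = c2
  generalize (PySem.Str.isIn "operations" pl || (PySem.Str.isIn "production" pl ||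
      PySem.Str.isIn "executive" pl)) = c3
  generalize (PySem.Str.isIn "client" pl || (PySem.Str.isIn "servicing" pl ||
      PySem.Str.isIn "relations" pl)) = c4
  generalize (PySem.Str.isIn "finance" pl || PySem.Str.isIn "accounting" pl) = c5
  generalize (PySem.Str.isIn "human" pl || PySem.Str.isIn "hr" pl) = c6
  generalize (PySem.Str.isIn "marketing" pl || PySem.Str.isIn "digital" pl) = c7
  revert c1 c2 c3 c4 c5 c6 c7
  decide
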